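-- pv_equiv track=rewrite | github.com/Birdy-C/DailyCodingProblem | Subscription/62#-dp-NavigatingBoard.py | waysOfWalking
-- ===== SOURCE A (Python) =====
-- def waysOfWalking(N, M):
--     dp = [1 for _ in range(M)]
--     for i in range(1, N):
--         dpnew = dp.copy()
--         for j in range(1, M):
--             dpnew[j] = dpnew[j-1] + dp[j]
--         dp = dpnew.copy()
--     return dp[-1]
-- ===== SOURCE B (Python) =====
-- def waysOfWalking(N, M):
--     # closed form: C(N+M-2, min(N,M)-1) via the multiplicative binomial formula
--     n = N + M - 2
--     k = min(N - 1, M - 1)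
--     c = 1
--     for i in range(1, k + 1):
--         c = c * (n - k + i) // i
--     return c
-- ===== Notes on version B (the rewrite author's own statement) =====
-- stated objective: faster
-- what changed: Replaced the O(N*M) dynamic-programming table with the closed-form binomial coefficient C(N+M-2, min(N,M)-1) computed by the multiplicative formula in O(min(N,M)) exact integer steps.
import Mathlib
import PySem

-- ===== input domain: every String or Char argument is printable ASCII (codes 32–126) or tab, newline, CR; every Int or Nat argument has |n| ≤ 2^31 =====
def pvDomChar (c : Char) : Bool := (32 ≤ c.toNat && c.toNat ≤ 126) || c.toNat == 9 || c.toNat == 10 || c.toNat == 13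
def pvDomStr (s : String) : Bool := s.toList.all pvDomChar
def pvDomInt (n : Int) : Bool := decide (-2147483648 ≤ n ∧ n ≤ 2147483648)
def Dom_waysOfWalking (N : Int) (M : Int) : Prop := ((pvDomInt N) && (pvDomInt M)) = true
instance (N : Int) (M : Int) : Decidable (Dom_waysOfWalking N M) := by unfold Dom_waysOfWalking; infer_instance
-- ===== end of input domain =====

-- B replaces A's DP table with the closed-form binomial C(N+M-2, min(N,M)-1) computed by the
-- multiplicative formula (objective: faster).

-- ===== PORT A =====
-- A-side helper: the inner 'for j in range(1, M)' loop ('dpnew' starts as dp.copy()).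
-- A Python list is an array, so dp is an Array Int; every j in range(1, M) is nonnegative and
-- in bounds, where setIfInBounds/getD compute exactly Python's dpnew[j] = …, dpnew[j-1], dp[j]
-- (proved against the PySem list primitives in pvInner_toList below).
def waysInner (M : Int) (dp : Array Int) (dpnew : Array Int) : Array Int :=
  (PySem.List.pyRange 1 M 1).foldl (fun dpnew j =>
    dpnew.setIfInBounds j.toNat (dpnew.getD (j.toNat - 1) 0 + dp.getD j.toNat 0)) dpnew

def waysOfWalking (N : Int) (M : Int) : Int :=
  let dp : Array Int := ((PySem.List.pyRange 0 M 1).map (fun _ => (1 : Int))).toArray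
  let dpF := (PySem.List.pyRange 1 N 1).foldl (fun dp _i => waysInner M dp dp) dp
  PySem.List.pyGetD dpF.toList (-1) 0

-- ===== PORT B =====
def waysOfWalking_alt (N : Int) (M : Int) : Int :=
  let n := N + M - 2
  let k := min (N - 1) (M - 1)
  (PySem.List.pyRange 1 (k + 1) 1).foldl (fun c i => PySem.Int.floordiv (c * (n - k + i)) i) 1

-- ===== PRECONDITION & SPEC =====
-- A raises IndexError (dp[-1] on the empty list) exactly when M ≤ 0; those inputs are excluded.
def Pre_waysOfWalking (N : Int) (M : Int) : Prop := 1 ≤ M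
instance (N : Int) (M : Int) : Decidable (Pre_waysOfWalking N M) := by unfold Pre_waysOfWalking; infer_instance
def pvWitness_waysOfWalking : Int × Int := (3, 4)

def Spec_waysOfWalking (N : Int) (M : Int) (out : Int) : Prop := out = waysOfWalking_alt N M
instance (N : Int) (M : Int) (out : Int) : Decidable (Spec_waysOfWalking N M out) := by unfold Spec_waysOfWalking; infer_instance

-- ===== CLAIM (what is proved, stated in full; the proofs are below) =====
def Claim_equal_waysOfWalking : Prop := ∀ (N : Int) (M : Int), Dom_waysOfWalking N M → Pre_waysOfWalking N M → Spec_waysOfWalking N M (waysOfWalking N M)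

-- ===== LEMMAS AND PROOFS =====

-- list-level model of the inner loop, stated with the PySem primitives
def pvInnerL (M : Int) (dp : List Int) (dpnew : List Int) : List Int :=
  (PySem.List.pyRange 1 M 1).foldl (fun dpnew j =>
    PySem.List.pySetD dpnew j (PySem.List.pyGetD dpnew (j - 1) 0 + PySem.List.pyGetD dp j 0)) dpnew

theorem pvGetD_arr (a : Array Int) (i : Nat) (d : Int) : a.getD i d = a.toList.getD i d := by
  by_cases h : i < a.size
  · simp [Array.getD, List.getD, h]
  · simp [Array.getD, List.getD, h]

theorem pvGetD_int (xs : List Int) (i : Int) (d : Int) (h : 0 ≤ i) :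
    PySem.List.pyGetD xs i d = xs.getD i.toNat d := by
  simp [PySem.List.pyGetD, PySem.List.pyGet?_of_nonneg _ h, List.getD]

theorem pvInner_toList (M : Int) (dpA : Array Int) (arr : Array Int) :
    (waysInner M dpA arr).toList = pvInnerL M dpA.toList arr.toList := by
  unfold waysInner pvInnerL
  suffices h : ∀ (l : List Int), (∀ j ∈ l, 1 ≤ j) → ∀ (arr : Array Int),
      (l.foldl (fun dpnew j =>
        dpnew.setIfInBounds j.toNat (dpnew.getD (j.toNat - 1) 0 + dpA.getD j.toNat 0)) arr).toList
      = l.foldl (fun dpnew j =>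
        PySem.List.pySetD dpnew j (PySem.List.pyGetD dpnew (j - 1) 0 + PySem.List.pyGetD dpA.toList j 0)) arr.toList by
    exact h _ (fun j hj => (PySem.List.mem_pyRange_one.mp hj).1) arr
  intro l
  induction l with
  | nil => intro _ arr; rfl
  | cons j tl ih =>
    intro hall arr
    have hj : 1 ≤ j := hall j (List.mem_cons_self ..)
    rw [List.foldl_cons, List.foldl_cons, ih (fun x hx => hall x (List.mem_cons_of_mem _ hx))]
    congr 1
    rw [Array.toList_setIfInBounds, PySem.List.pySetD_of_nonneg _ _ (by omega),
        pvGetD_int _ _ _ (by omega), pvGetD_int _ _ _ (by omega),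
        pvGetD_arr, pvGetD_arr, show (j - 1).toNat = j.toNat - 1 by omega]

-- row r of the DP table of width m: entry j is C(r+j, j)
def pvRow (m r : Nat) : List Int := (List.range m).map (fun j => ((Nat.choose (r + j) j : Nat) : Int))

-- the inner loop's state after processing j = 1 .. t-1
def pvMix (m r t : Nat) : List Int :=
  (List.range m).map (fun j => if j < t then ((Nat.choose (r + 1 + j) j : Nat) : Int) else ((Nat.choose (r + j) j : Nat) : Int))

theorem pvInner_invariant (m r : Nat) : ∀ (t : Nat), 1 ≤ t → t ≤ m →
    (PySem.List.pyRange 1 (t : Int) 1).foldl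
      (fun a j => PySem.List.pySetD a j (PySem.List.pyGetD a (j - 1) 0 + PySem.List.pyGetD (pvRow m r) j 0))
      (pvRow m r) = pvMix m r t := by
  intro t
  induction t with
  | zero => omega
  | succ t ih =>
    intro _ htm
    by_cases ht : t = 0
    · subst ht
      rw [show ((1:Nat):Int) = 1 by norm_num, PySem.List.pyRange_one_eq_nil le_rfl]
      simp only [List.foldl_nil, pvRow, pvMix]
      apply List.map_congr_left
      intro j hj
      by_cases hj1 : j < 1
      · interval_cases j
        simp
      · simp [hj1]
    · have ht1 : 1 ≤ t := by omega
      have hcast : ((t + 1 : Nat) : Int) = (t : Int) + 1 := by push_cast; ring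
      rw [hcast, PySem.List.pyRange_one_succ_right (by omega : (1:Int) ≤ (t:Int)),
          List.foldl_append, ih ht1 (by omega)]
      simp only [List.foldl_cons, List.foldl_nil]
      have hsub : (t : Int) - 1 = ((t - 1 : Nat) : Int) := by omega
      rw [hsub, PySem.List.pyGetD_natCast, PySem.List.pyGetD_natCast, PySem.List.pySetD_natCast]
      have htm' : t < m := by omega
      have hg1 : (pvMix m r t).getD (t-1) 0 = ((Nat.choose (r + t) (t - 1) : Nat) : Int) := by
        have h1 : t - 1 < m := by omega
        simp [pvMix, List.getD, h1, show t - 1 < t by omega, show r + 1 + (t - 1) = r + t by omega]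
      have hg2 : (pvRow m r).getD t 0 = ((Nat.choose (r + t) t : Nat) : Int) := by
        simp [pvRow, List.getD, htm']
      rw [hg1, hg2]
      have hval : ((Nat.choose (r + t) (t-1) : Nat) : Int) + ((Nat.choose (r + t) t : Nat) : Int)
          = ((Nat.choose (r + 1 + t) t : Nat) : Int) := by
        obtain ⟨t', rfl⟩ : ∃ t', t = t' + 1 := ⟨t - 1, by omega⟩
        have h := Nat.choose_succ_succ (r + 1 + t') t'
        push_cast
        rw [show r + 1 + (t' + 1) = (r + 1 + t') + 1 by ring, h]
        push_cast
        rw [show r + 1 + t' = r + (t' + 1) by ring]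
      rw [hval]
      apply List.ext_getElem
      · simp [pvMix]
      · intro i h1 h2
        simp only [pvMix, List.length_map, List.length_range] at h2
        simp only [pvMix, List.getElem_set, List.getElem_map, List.getElem_range]
        by_cases hit : t = i
        · subst hit; simp
        · simp only [hit, if_false]
          by_cases hilt : i < t
          · simp [hilt, show i < t + 1 by omega]
          · simp [hilt, show ¬ i < t + 1 by omega]

theorem pvStep (m : Nat) (hm : 1 ≤ m) (r : Nat) :
    pvInnerL (m : Int) (pvRow m r) (pvRow m r) = pvRow m (r + 1) := by
  unfold pvInnerL
  rw [pvInner_invariant m r m hm le_rfl]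
  unfold pvMix pvRow
  apply List.map_congr_left
  intro j hj
  simp only [List.mem_range] at hj
  simp [hj, show r + 1 + j = r + j + 1 by ring]

theorem pvOuter (m : Nat) (hm : 1 ≤ m) : ∀ (l : List Int) (r : Nat),
    l.foldl (fun dp _i => pvInnerL (m : Int) dp dp) (pvRow m r) = pvRow m (r + l.length) := by
  intro l
  induction l with
  | nil => simp
  | cons x xs ih =>
    intro r
    rw [List.foldl_cons, pvStep m hm r, ih (r + 1)]
    congr 1
    simp
    omega

theorem pvBinLoop (a : Nat) : ∀ (t : Nat),
    (PySem.List.pyRange 1 ((t : Int) + 1) 1).foldl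
      (fun c i => PySem.Int.floordiv (c * ((a : Int) + i)) i) 1
      = ((Nat.choose (a + t) t : Nat) : Int) := by
  intro t
  induction t with
  | zero => simp [PySem.List.pyRange_one_eq_nil]
  | succ t ih =>
    have h1 : ((t + 1 : Nat) : Int) + 1 = ((t : Int) + 1) + 1 := by push_cast; ring
    rw [h1, PySem.List.pyRange_one_succ_right (by omega : (1:Int) ≤ (t:Int) + 1),
        List.foldl_append, ih]
    show PySem.Int.floordiv (((Nat.choose (a+t) t : Nat) : Int) * ((a : Int) + ((t:Int)+1))) ((t:Int)+1)
        = ((Nat.choose (a + (t+1)) (t+1) : Nat) : Int)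
    have h2 : ((Nat.choose (a+t) t : Nat) : Int) * ((a : Int) + ((t:Int)+1))
        = ((Nat.choose (a+t) t * (a + t + 1) : Nat) : Int) := by push_cast; ring
    have h3 : Nat.choose (a+t) t * (a + t + 1) = Nat.choose (a+t+1) (t+1) * (t+1) := by
      rw [Nat.mul_comm]
      exact Nat.add_one_mul_choose_eq (a+t) t
    have h4 : ((t:Int) + 1) = ((t + 1 : Nat) : Int) := by push_cast; ring
    rw [h2, h3, h4, PySem.Int.floordiv_natCast]
    have h5 : Nat.choose (a+t+1) (t+1) * (t+1) / (t+1) = Nat.choose (a+t+1) (t+1) :=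
      Nat.mul_div_cancel _ (by omega)
    rw [h5]
    norm_num [Nat.add_assoc]

theorem pvInit (m : Nat) :
    ((PySem.List.pyRange 0 (m : Int) 1).map (fun _ => (1 : Int))) = pvRow m 0 := by
  rw [PySem.List.pyRange_one]
  simp only [List.map_map, pvRow]
  apply List.map_congr_left
  intro j hj
  simp [Nat.choose_self]

theorem pvLast (m R : Nat) (hm : 1 ≤ m) :
    PySem.List.pyGetD (pvRow m R) (-1) 0 = ((Nat.choose (R + (m - 1)) (m - 1) : Nat) : Int) := by
  have hlen : (pvRow m R).length = m := by simp [pvRow]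
  rw [PySem.List.pyGetD_neg_ofNat (pvRow m R) 1 0 (by omega) (by omega)]
  simp [pvRow]

theorem pvOuter_toList (M : Int) : ∀ (l : List Int) (arr : Array Int),
    (l.foldl (fun dp _i => waysInner M dp dp) arr).toList
      = l.foldl (fun dp _i => pvInnerL M dp dp) arr.toList := by
  intro l
  induction l with
  | nil => intro arr; rfl
  | cons x tl ih =>
    intro arr
    rw [List.foldl_cons, List.foldl_cons, ih, pvInner_toList]

theorem pvAval (N : Int) (m : Nat) (hm : 1 ≤ m) :
    waysOfWalking N (m : Int) = ((Nat.choose ((N - 1).toNat + (m - 1)) (m - 1) : Nat) : Int) := by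
  simp only [waysOfWalking]
  rw [pvOuter_toList]
  rw [show ((PySem.List.pyRange 0 (m : Int) 1).map (fun _ => (1 : Int))).toArray.toList
        = pvRow m 0 by rw [List.toList_toArray]; exact pvInit m]
  have h := pvOuter m hm (PySem.List.pyRange 1 N 1) 0
  rw [h, PySem.List.length_pyRange_one, Nat.zero_add]
  exact pvLast m (N - 1).toNat hm

theorem pvAltVal (N M : Int) (hM : 1 ≤ M) (h2 : 2 ≤ N) :
    waysOfWalking_alt N M
      = ((Nat.choose ((N + M - 2).toNat) ((min (N - 1) (M - 1)).toNat) : Nat) : Int) := by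
  simp only [waysOfWalking_alt]
  set k := min (N - 1) (M - 1) with hk
  have hkl : k ≤ N - 1 := min_le_left _ _
  have hkr : k ≤ M - 1 := min_le_right _ _
  have hk0 : 0 ≤ k := le_min (by omega) (by omega)
  have hnk : 0 ≤ N + M - 2 - k := by omega
  have ha : N + M - 2 - k = (((N + M - 2 - k).toNat : Nat) : Int) := (Int.toNat_of_nonneg hnk).symm
  have hkK : k + 1 = ((k.toNat : Nat) : Int) + 1 := by rw [Int.toNat_of_nonneg hk0]
  have hbody : (fun (c i : Int) => PySem.Int.floordiv (c * (N + M - 2 - k + i)) i)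
      = (fun (c i : Int) => PySem.Int.floordiv (c * (((N + M - 2 - k).toNat : Nat) + i)) i) := by
    funext c i; rw [← ha]
  rw [hkK, hbody, pvBinLoop (N + M - 2 - k).toNat k.toNat]
  have h : (N + M - 2 - k).toNat + k.toNat = (N + M - 2).toNat := by omega
  rw [h]

theorem pvMain : ∀ (N M : Int), 1 ≤ M → waysOfWalking N M = waysOfWalking_alt N M := by
  intro N M hM
  have hMm : M = ((M.toNat : Nat) : Int) := (Int.toNat_of_nonneg (by omega)).symm
  set m := M.toNat with hm
  have hm1 : 1 ≤ m := by omega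
  by_cases h2 : 2 ≤ N
  · rw [hMm, pvAval N m hm1, ← hMm, pvAltVal N M hM h2]
    have hn' : (N + M - 2).toNat = (N - 1).toNat + (m - 1) := by omega
    rw [hn']
    rcases le_or_gt (N - 1) (M - 1) with hle | hlt
    · rw [min_eq_left hle]
      have hR : (N - 1).toNat ≤ (N - 1).toNat + (m - 1) := by omega
      have hsym := Nat.choose_symm hR
      rw [show (N - 1).toNat + (m - 1) - (N - 1).toNat = m - 1 by omega] at hsym
      rw [← hsym]
    · rw [min_eq_right (by omega)]
      congr 2
      omega
  · -- N ≤ 1: the outer loop is empty on both sides and both return 1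
    rw [hMm, pvAval N m hm1, ← hMm]
    have hR : (N - 1).toNat = 0 := by omega
    rw [hR, Nat.zero_add, Nat.choose_self]
    simp only [waysOfWalking_alt]
    have hmin : min (N - 1) (M - 1) = N - 1 := min_eq_left (by omega)
    rw [hmin, show N - 1 + 1 = N by ring, PySem.List.pyRange_one_eq_nil (by omega : N ≤ 1)]
    simp

-- ===== VERDICT (by name: the statement is the Claim_ definition above) =====
theorem waysOfWalking_spec : Claim_equal_waysOfWalking := by
  intro N M _ hPre
  unfold Spec_waysOfWalking
  unfold Pre_waysOfWalking at hPre
  exact pvMain N M hPre
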